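-- pv_equiv track=rewrite | github.com/TilakKumar279/Python_ | hand_shake.py | hand_s
-- ===== SOURCE A (Python) =====
-- import itertools
--
-- def hand_s(N):
--     a=[]
--     f=[]
--     d=[]
--     for i in range(N):
-- 	       a.append(i)
--
--     f=list(itertools.permutations(a,2))
--
--     for i in range (len(f)):
--         e=list(f[i])
--         e.sort()
--         if (e not in d):
--             d.append(e)
--     return len(d)
-- ===== SOURCE B (Python) =====
-- def hand_s(N):
--     # closed form: number of unordered pairs among N items
--     return N * (N - 1) // 2 if N > 1 else 0
-- ===== Notes on version B (the rewrite author's own statement) =====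
-- stated objective: faster
-- what changed: Replaces building all ordered pairs and deduplicating their sorted forms by the closed form N*(N-1)//2 (0 for N<=1).
import Mathlib
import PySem

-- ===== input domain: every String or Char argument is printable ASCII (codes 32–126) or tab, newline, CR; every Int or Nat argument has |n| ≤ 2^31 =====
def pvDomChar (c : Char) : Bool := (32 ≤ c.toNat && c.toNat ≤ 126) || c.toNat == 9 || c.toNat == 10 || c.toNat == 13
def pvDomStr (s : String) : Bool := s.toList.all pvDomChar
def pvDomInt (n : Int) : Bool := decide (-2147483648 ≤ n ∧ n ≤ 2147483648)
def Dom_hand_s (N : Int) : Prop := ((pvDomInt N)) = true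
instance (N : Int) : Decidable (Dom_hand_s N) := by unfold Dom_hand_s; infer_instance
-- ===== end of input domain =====

-- B replaces A's quartic build-all-ordered-pairs-and-deduplicate by the closed form N*(N-1)//2.

-- ===== PORT A =====
-- helper: list(itertools.permutations(a, 2)) — all ordered pairs of distinct entries, in
-- permutation order; exact for lists of distinct elements (a = range(N) here)
def pvPerms2 (a : List Int) : List (Int × Int) :=
  a.flatMap (fun x => (a.filter (fun y => y != x)).map (fun y => (x, y)))

def hand_s (N : Int) : Int :=
  -- first loop: a = [0, 1, ..., N-1]
  let a := PySem.List.pyRange 0 N 1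
  let f := pvPerms2 a
  -- second loop over f: e = sorted pair; append to d if not already present
  let d := f.foldl (fun d p =>
      let e := PySem.List.sorted [p.1, p.2] (fun z => z) false
      if e ∈ d then d else d ++ [e]) ([] : List (List Int))
  Int.ofNat d.length

-- ===== PORT B =====
def hand_s_alt (N : Int) : Int :=
  if 1 < N then PySem.Int.floordiv (N * (N - 1)) 2 else 0

-- ===== PRECONDITION & SPEC =====
def Spec_hand_s (N : Int) (out : Int) : Prop := out = hand_s_alt N
instance (N : Int) (out : Int) : Decidable (Spec_hand_s N out) := by unfold Spec_hand_s; infer_instance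

-- ===== CLAIM (what is proved, stated in full; the proofs are below) =====
def Claim_equal_hand_s : Prop := ∀ (N : Int), Dom_hand_s N → Spec_hand_s N (hand_s N)

-- ===== LEMMAS AND PROOFS =====

-- the sorted two-element list A's inner loop computes
def pvSp (x y : Int) : List Int := PySem.List.sorted [x, y] (fun z => z) false

-- the dedup-append step of A's second loop
def pvStep (d : List (List Int)) (e : List Int) : List (List Int) :=
  if e ∈ d then d else d ++ [e]

theorem pvSp_eq (x y : Int) : pvSp x y = if x ≤ y then [x, y] else [y, x] := by
  unfold pvSp
  split_ifs with h
  · exact PySem.List.sorted_id_eq_of_perm_of_pairwise [x, y] [x, y] (List.Perm.refl _)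
      (by simp [h])
  · exact PySem.List.sorted_id_eq_of_perm_of_pairwise [x, y] [y, x] (List.Perm.swap x y [])
      (by simp; omega)

theorem pvSp_comm (x y : Int) : pvSp x y = pvSp y x := by
  by_cases h : x ≤ y
  · by_cases h' : y ≤ x
    · have hxy : x = y := le_antisymm h h'
      subst hxy; rfl
    · rw [pvSp_eq, pvSp_eq, if_pos h, if_neg h']
  · rw [pvSp_eq, pvSp_eq, if_neg h, if_pos (by omega)]

theorem pvFold_nodup (l : List (List Int)) :
    ∀ d : List (List Int), d.Nodup → (l.foldl pvStep d).Nodup := by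
  induction l with
  | nil => intro d hd; simpa using hd
  | cons e t ih =>
    intro d hd
    simp only [List.foldl_cons]
    apply ih
    unfold pvStep
    split_ifs with h
    · exact hd
    · simp [List.nodup_append, hd]
      exact fun a ha hae => h (hae ▸ ha)

theorem pvFold_toFinset (l : List (List Int)) :
    ∀ d : List (List Int), (l.foldl pvStep d).toFinset = d.toFinset ∪ l.toFinset := by
  induction l with
  | nil => intro d; simp
  | cons e t ih =>
    intro d
    simp only [List.foldl_cons, ih]
    have hstep : (pvStep d e).toFinset = insert e d.toFinset := by
      unfold pvStep
      split_ifs with h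
      · rw [Finset.insert_eq_self.mpr (List.mem_toFinset.mpr h)]
      · ext m
        simp only [List.mem_toFinset, List.mem_append, List.mem_singleton, Finset.mem_insert]
        tauto
    rw [hstep]
    ext m
    simp only [Finset.mem_union, Finset.mem_insert, List.mem_toFinset, List.mem_cons]
    tauto

theorem pvMem_perms2 (a : List Int) (p : Int × Int) :
    p ∈ pvPerms2 a ↔ p.1 ∈ a ∧ p.2 ∈ a ∧ p.2 ≠ p.1 := by
  obtain ⟨x, y⟩ := p
  simp [pvPerms2, List.mem_flatMap, List.mem_map, List.mem_filter]

-- the distinct sorted pairs drawn from a nodup list: their number c satisfies 2c = k(k-1)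
theorem pvCard_key (l : List Int) (hl : l.Nodup) :
    2 * (((pvPerms2 l).map (fun p => pvSp p.1 p.2)).toFinset).card
      = l.length * (l.length - 1) := by
  induction l with
  | nil => simp [pvPerms2]
  | cons x t ih =>
    rw [List.nodup_cons] at hl
    obtain ⟨hx, ht⟩ := hl
    have hsplit : ((pvPerms2 (x :: t)).map (fun p => pvSp p.1 p.2)).toFinset
        = (t.map (fun y => pvSp x y)).toFinset
          ∪ ((pvPerms2 t).map (fun p => pvSp p.1 p.2)).toFinset := by
      ext m
      simp only [List.mem_toFinset, List.mem_map, Finset.mem_union]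
      constructor
      · rintro ⟨⟨p1, p2⟩, hp, rfl⟩
        rw [pvMem_perms2] at hp
        obtain ⟨h1, h2, hne⟩ := hp
        simp only [List.mem_cons] at h1 h2
        rcases h1 with rfl | h1
        · rcases h2 with rfl | h2
          · exact absurd rfl hne
          · exact Or.inl ⟨p2, h2, rfl⟩
        · rcases h2 with rfl | h2
          · exact Or.inl ⟨p1, h1, (pvSp_comm p1 p2).symm⟩
          · exact Or.inr ⟨(p1, p2), (pvMem_perms2 t _).mpr ⟨h1, h2, hne⟩, rfl⟩
      · rintro (⟨y, hy, rfl⟩ | ⟨p, hp, rfl⟩)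
        · exact ⟨(x, y), (pvMem_perms2 _ _).mpr
            ⟨List.mem_cons_self, List.mem_cons_of_mem _ hy, fun h => hx ((show y = x from h) ▸ hy)⟩, rfl⟩
        · rw [pvMem_perms2] at hp
          exact ⟨p, (pvMem_perms2 _ _).mpr
            ⟨List.mem_cons_of_mem _ hp.1, List.mem_cons_of_mem _ hp.2.1, hp.2.2⟩, rfl⟩
    have hmemx : ∀ y, x ∈ pvSp x y := by
      intro y; rw [pvSp_eq]; split_ifs <;> simp
    have hsub : ∀ z w : Int, ∀ u ∈ pvSp z w, u = z ∨ u = w := by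
      intro z w u hu; rw [pvSp_eq] at hu; split_ifs at hu <;> simpa [or_comm] using hu
    have hdisj : Disjoint (t.map (fun y => pvSp x y)).toFinset
        ((pvPerms2 t).map (fun p => pvSp p.1 p.2)).toFinset := by
      rw [Finset.disjoint_left]
      rintro m hm hm'
      simp only [List.mem_toFinset, List.mem_map] at hm hm'
      obtain ⟨y, _, rfl⟩ := hm
      obtain ⟨p, hp, hpe⟩ := hm'
      rw [pvMem_perms2] at hp
      have := hsub p.1 p.2 x (by rw [hpe]; exact hmemx y)
      rcases this with rfl | rfl
      · exact hx hp.1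
      · exact hx hp.2.1
    have hndmap : (t.map (fun y => pvSp x y)).Nodup := by
      refine List.Nodup.map_on ?_ ht
      intro y1 hy1 y2 hy2 heq
      have h1 : y1 ≠ x := fun h => hx (h ▸ hy1)
      have h2 : y2 ≠ x := fun h => hx (h ▸ hy2)
      rw [pvSp_eq, pvSp_eq] at heq
      split_ifs at heq <;> simp_all
    rw [hsplit, Finset.card_union_of_disjoint hdisj,
      List.toFinset_card_of_nodup hndmap, List.length_map]
    have hrec := ih ht
    cases t with
    | nil => simp [pvPerms2]
    | cons z s =>
      simp only [List.length_cons] at hrec ⊢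
      simp only [Nat.add_sub_cancel] at hrec ⊢
      nlinarith [hrec]

theorem pvHand_s_count (N : Int) :
    hand_s N = Int.ofNat
      (((pvPerms2 (PySem.List.pyRange 0 N 1)).map (fun p => pvSp p.1 p.2)).toFinset).card := by
  have hmap : ∀ (l : List (Int × Int)) (d : List (List Int)),
      l.foldl (fun d p => pvStep d (pvSp p.1 p.2)) d
        = (l.map (fun p => pvSp p.1 p.2)).foldl pvStep d := by
    intro l; induction l with
    | nil => intro d; rfl
    | cons p t ih => intro d; simp only [List.foldl_cons, List.map_cons]; exact ih _
  have hshow : hand_s N = Int.ofNat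
      ((pvPerms2 (PySem.List.pyRange 0 N 1)).foldl
        (fun d p => pvStep d (pvSp p.1 p.2)) []).length := rfl
  rw [hshow, hmap]
  have hnd := pvFold_nodup ((pvPerms2 (PySem.List.pyRange 0 N 1)).map (fun p => pvSp p.1 p.2))
    [] (by simp)
  rw [congrArg Int.ofNat (List.toFinset_card_of_nodup hnd).symm, pvFold_toFinset]
  simp

-- ===== VERDICT (by name: the statement is the Claim_ definition above) =====
theorem hand_s_spec : Claim_equal_hand_s := by
  intro N _
  unfold Spec_hand_s hand_s_alt
  rw [pvHand_s_count]
  set c := (((pvPerms2 (PySem.List.pyRange 0 N 1)).map (fun p => pvSp p.1 p.2)).toFinset).card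
    with hc
  have hkey := pvCard_key (PySem.List.pyRange 0 N 1) (PySem.List.nodup_pyRange_one 0 N)
  rw [PySem.List.length_pyRange_one] at hkey
  rw [← hc] at hkey
  split_ifs with h
  · rw [PySem.Int.floordiv_eq_ediv_of_pos (by omega)]
    have hnn : (((N - 0).toNat : Int)) = N := by omega
    have hge : 1 ≤ (N - 0).toNat := by omega
    have h2 : N * (N - 1) = 2 * (c : Int) := by
      zify [hge] at hkey
      rw [hnn] at hkey
      omega
    rw [h2]
    show (c : Int) = (2 : Int) * (c : Int) / 2
    omega
  · have hn : (N - 0).toNat ≤ 1 := by omega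
    rcases Nat.le_one_iff_eq_zero_or_eq_one.mp hn with h0 | h0 <;>
      rw [h0] at hkey <;> simp at hkey <;> simp [hkey]
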